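-- pv_equiv track=rewrite | github.com/iSPD/marketSILVER | SilBrain/compare/compare_db.py | compareAnd
-- ===== SOURCE A (Python) =====
-- def compareAnd(input_keyword_list, compare_to):
--     real_cnt = 0
--     output_list = []
--     for dst_sentence in compare_to:
--         real_cnt = 0
--         for keyword in input_keyword_list:
--             if keyword in dst_sentence and keyword != 'none':
--                 real_cnt = real_cnt + 1
--         if real_cnt == len(input_keyword_list):
--             output_list.append(dst_sentence)
--     return output_list
-- ===== SOURCE B (Python) =====
-- def compareAnd(input_keyword_list, compare_to):
--     # Progressive filtering: keywords outer, candidate sentences shrink each pass.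
--     candidates = list(compare_to)
--     for keyword in input_keyword_list:
--         candidates = [s for s in candidates if keyword in s and keyword != 'none']
--     return candidates
-- ===== Notes on version B (the rewrite author's own statement) =====
-- stated objective: alternative
-- what changed: Inverts the loop nesting: instead of counting per sentence how many keywords match and comparing to len(input_keyword_list), B keeps a shrinking candidate list and applies one filtering pass per keyword.
import Mathlib
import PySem

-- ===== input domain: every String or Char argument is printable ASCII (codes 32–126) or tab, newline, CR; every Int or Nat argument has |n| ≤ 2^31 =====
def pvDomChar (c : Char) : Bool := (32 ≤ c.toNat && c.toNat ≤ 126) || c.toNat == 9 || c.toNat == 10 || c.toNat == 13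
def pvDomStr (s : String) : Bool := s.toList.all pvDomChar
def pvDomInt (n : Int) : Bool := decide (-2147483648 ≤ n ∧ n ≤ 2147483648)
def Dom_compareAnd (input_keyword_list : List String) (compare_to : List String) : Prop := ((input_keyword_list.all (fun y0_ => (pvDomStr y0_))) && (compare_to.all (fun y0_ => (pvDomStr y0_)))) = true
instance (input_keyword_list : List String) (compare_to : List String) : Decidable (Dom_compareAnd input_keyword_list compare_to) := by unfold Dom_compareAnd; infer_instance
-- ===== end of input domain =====

-- B inverts the loop nesting: a shrinking candidate list, one filtering pass per keyword,
-- instead of A's per-sentence count compared against len(input_keyword_list).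

-- ===== PORT A =====
-- per-sentence count of matching keywords (inner loop of A)
def compareAnd (input_keyword_list : List String) (compare_to : List String) : List String :=
  compare_to.foldl (fun output_list dst_sentence =>
    let real_cnt : Int :=
      input_keyword_list.foldl (fun real_cnt keyword =>
        if PySem.Str.isIn keyword dst_sentence && keyword != "none" then real_cnt + 1 else real_cnt) 0
    if real_cnt = (input_keyword_list.length : Int) then output_list ++ [dst_sentence] else output_list) []

-- ===== PORT B =====
def compareAnd_alt (input_keyword_list : List String) (compare_to : List String) : List String :=
  input_keyword_list.foldl (fun candidates keyword =>
    candidates.filter (fun s => PySem.Str.isIn keyword s && keyword != "none")) compare_to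

-- ===== PRECONDITION & SPEC =====
def Spec_compareAnd (input_keyword_list : List String) (compare_to : List String) (out : List String) : Prop := out = compareAnd_alt input_keyword_list compare_to
instance (input_keyword_list : List String) (compare_to : List String) (out : List String) : Decidable (Spec_compareAnd input_keyword_list compare_to out) := by unfold Spec_compareAnd; infer_instance

-- ===== CLAIM (what is proved, stated in full; the proofs are below) =====
def Claim_equal_compareAnd : Prop := ∀ (input_keyword_list : List String) (compare_to : List String), Dom_compareAnd input_keyword_list compare_to → Spec_compareAnd input_keyword_list compare_to (compareAnd input_keyword_list compare_to)

-- ===== LEMMAS AND PROOFS =====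

-- A's inner counting loop is countP
lemma count_foldl (p : String → Bool) (l : List String) (n : Int) :
    l.foldl (fun c k => if p k then c + 1 else c) n = n + (l.countP p : Int) := by
  induction l generalizing n with
  | nil => simp
  | cons k ks ih =>
    simp only [List.foldl_cons, List.countP_cons, ih]
    by_cases h : p k = true <;> simp [h]
    omega

-- A's result is a single filter by "all keywords match"
lemma compareAnd_eq_filter (l c : List String) :
    compareAnd l c = c.filter (fun s => l.all (fun k => PySem.Str.isIn k s && k != "none")) := by
  unfold compareAnd
  induction c using List.reverseRecOn with
  | nil => simp
  | append_singleton c s ih =>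
    rw [List.foldl_append, List.filter_append, ih]
    simp only [List.foldl_cons, List.foldl_nil, List.filter_cons, List.filter_nil]
    rw [count_foldl]
    have hiff : ((0 : Int) + ((l.countP (fun k => PySem.Str.isIn k s && k != "none")) : Int) = (l.length : Int))
        ↔ (l.all (fun k => PySem.Str.isIn k s && k != "none") = true) := by
      rw [List.all_eq_true, ← List.countP_eq_length]
      omega
    by_cases h : l.all (fun k => PySem.Str.isIn k s && k != "none") = true
    · rw [if_pos (hiff.mpr h), if_pos h]
    · rw [if_neg (fun hc => h (hiff.mp hc)), if_neg h, List.append_nil]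

-- B's repeated filtering collapses to the same single filter
lemma alt_eq_filter (l c : List String) :
    compareAnd_alt l c = c.filter (fun s => l.all (fun k => PySem.Str.isIn k s && k != "none")) := by
  unfold compareAnd_alt
  induction l generalizing c with
  | nil => simp
  | cons k ks ih =>
    simp only [List.foldl_cons]
    rw [ih, List.filter_filter]
    congr 1
    funext s
    simp [List.all_cons, Bool.and_comm]

-- ===== VERDICT (by name: the statement is the Claim_ definition above) =====
theorem compareAnd_spec : Claim_equal_compareAnd := by
  intro l c _
  unfold Spec_compareAnd
  rw [compareAnd_eq_filter, alt_eq_filter]
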